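-- pv_equiv track=rewrite | github.com/liuyuhanalex/Leetcode | simulation/2214. Minimum Health to Beat Game.py | minimumHealth
-- ===== SOURCE A (Python) =====
-- from typing import List
--
-- def minimumHealth(damage: List[int], armor: int) -> int:
--     sorted_damage = sorted(damage)
--     start, end = 0, len(sorted_damage) - 1
--     if armor == 0:
--         return sum(damage) + 1
--     while start < end:
--         mid = start + (end - start) // 2
--         if sorted_damage[mid] >= armor:
--             end = mid
--         else:
--             start = mid + 1
--     if armor < sorted_damage[start]:
--         return sum(damage) - armor + 1
--     return sum(damage) - sorted_damage[start] + 1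
-- ===== SOURCE B (Python) =====
-- def minimumHealth(damage, armor):
--     if armor == 0:
--         return sum(damage) + 1
--     return sum(damage) - min(max(damage), armor) + 1
-- ===== Notes on version B (the rewrite author's own statement) =====
-- stated objective: simpler
-- what changed: Replaces sort + binary search for the armor cutoff by the one-line closed form sum(damage) - min(max(damage), armor) + 1.
import Mathlib
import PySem

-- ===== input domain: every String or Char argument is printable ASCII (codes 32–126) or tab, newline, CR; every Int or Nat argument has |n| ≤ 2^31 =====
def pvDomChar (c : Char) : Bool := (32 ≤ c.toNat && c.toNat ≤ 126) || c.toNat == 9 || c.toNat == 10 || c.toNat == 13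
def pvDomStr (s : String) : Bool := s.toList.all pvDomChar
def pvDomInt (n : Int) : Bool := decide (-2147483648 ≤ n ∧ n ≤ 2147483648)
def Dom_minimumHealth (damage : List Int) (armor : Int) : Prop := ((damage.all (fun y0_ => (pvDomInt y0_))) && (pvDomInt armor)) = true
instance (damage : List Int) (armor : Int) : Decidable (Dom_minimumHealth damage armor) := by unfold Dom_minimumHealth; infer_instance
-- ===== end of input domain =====

-- B replaces A's sort + binary search by the closed form sum(damage) - min(max(damage), armor) + 1 (simpler; same measured speed).

-- ===== PORT A =====
-- the while-loop binary search of A, step for step (start/end stay in [0, len-1] on every input A returns on)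
def pvBSearch (sd : List Int) (armor : Int) : Nat → Nat → Nat
  | s, e =>
    if h : s < e then
      let mid := s + (e - s) / 2
      if armor ≤ sd.getD mid 0 then pvBSearch sd armor s mid
      else pvBSearch sd armor (mid + 1) e
    else s
termination_by s e => e - s
decreasing_by all_goals omega

def minimumHealth (damage : List Int) (armor : Int) : Int :=
  let sd := PySem.List.sorted damage (fun x => x) false
  if armor = 0 then damage.sum + 1
  else
    let start := pvBSearch sd armor 0 (sd.length - 1)
    let v := sd.getD start 0   -- sorted_damage[start]; index in range on every input inside Pre_
    if armor < v then damage.sum - armor + 1 else damage.sum - v + 1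

-- ===== PORT B =====
def minimumHealth_alt (damage : List Int) (armor : Int) : Int :=
  if armor = 0 then damage.sum + 1
  else
    match PySem.List.max? damage (fun x => x) with
    | none => 0   -- max([]) raises ValueError in Python; excluded by Pre_
    | some m => damage.sum - min m armor + 1

-- ===== PRECONDITION & SPEC =====
-- Pre_ excludes only the inputs on which A raises (IndexError): empty damage with armor ≠ 0.
def Pre_minimumHealth (damage : List Int) (armor : Int) : Prop := damage ≠ [] ∨ armor = 0
instance (damage : List Int) (armor : Int) : Decidable (Pre_minimumHealth damage armor) := by unfold Pre_minimumHealth; infer_instance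
def pvWitness_minimumHealth : List Int × Int := ([3, 5, 2], 4)

def Spec_minimumHealth (damage : List Int) (armor : Int) (out : Int) : Prop := out = minimumHealth_alt damage armor
instance (damage : List Int) (armor : Int) (out : Int) : Decidable (Spec_minimumHealth damage armor out) := by unfold Spec_minimumHealth; infer_instance

-- ===== CLAIM (what is proved, stated in full; the proofs are below) =====
def Claim_equal_minimumHealth : Prop := ∀ (damage : List Int) (armor : Int), Dom_minimumHealth damage armor → Pre_minimumHealth damage armor → Spec_minimumHealth damage armor (minimumHealth damage armor)

-- ===== LEMMAS AND PROOFS =====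

-- if the rightmost candidate is still below armor, A's search walks to it
theorem pvBSearch_all_lt (sd : List Int) (armor : Int)
    (hmono : ∀ p q : Nat, p ≤ q → q < sd.length → sd.getD p 0 ≤ sd.getD q 0) :
    ∀ (n s e : Nat), e - s ≤ n → s ≤ e → e < sd.length → sd.getD e 0 < armor →
      pvBSearch sd armor s e = e := by
  intro n
  induction n with
  | zero =>
    intro s e h1 h2 _ _
    have hse : s = e := by omega
    subst hse
    unfold pvBSearch
    simp
  | succ n ih =>
    intro s e h1 hse he hlt
    unfold pvBSearch
    by_cases h : s < e
    · have hmidlt : s + (e - s) / 2 < e := by omega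
      have hnotle : ¬ armor ≤ sd.getD (s + (e - s) / 2) 0 := by
        have := hmono (s + (e - s) / 2) e (by omega) he
        omega
      simp only [h, dif_pos, hnotle, if_neg, not_false_iff]
      exact ih (s + (e - s) / 2 + 1) e (by omega) (by omega) he hlt
    · have hse' : s = e := by omega
      subst hse'
      unfold pvBSearch
      simp

-- if some candidate reaches armor, the search returns an in-range index whose value reaches armor
theorem pvBSearch_ex (sd : List Int) (armor : Int) :
    ∀ (n s e : Nat), e - s ≤ n → s ≤ e → e < sd.length → armor ≤ sd.getD e 0 →
      armor ≤ sd.getD (pvBSearch sd armor s e) 0 ∧ pvBSearch sd armor s e < sd.length := by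
  intro n
  induction n with
  | zero =>
    intro s e h1 h2 he hge
    have hse : s = e := by omega
    subst hse
    unfold pvBSearch
    simp only [lt_irrefl, dif_neg, not_false_iff]
    exact ⟨hge, he⟩
  | succ n ih =>
    intro s e h1 hse he hge
    unfold pvBSearch
    by_cases h : s < e
    · simp only [h, dif_pos]
      by_cases hm : armor ≤ sd.getD (s + (e - s) / 2) 0
      · simp only [hm, if_pos]
        exact ih s (s + (e - s) / 2) (by omega) (by omega) (by omega) hm
      · simp only [hm, if_neg, not_false_iff]
        exact ih (s + (e - s) / 2 + 1) e (by omega) (by omega) he hge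
    · have hse' : s = e := by omega
      subst hse'
      unfold pvBSearch
      simp only [lt_irrefl, dif_neg, not_false_iff]
      exact ⟨hge, he⟩

-- the last element of sorted(damage) is max(damage)
theorem sorted_last_eq_max (damage : List Int) (m : Int)
    (hmax : PySem.List.max? damage (fun x => x) = some m) :
    (PySem.List.sorted damage (fun x => x) false).getD
      ((PySem.List.sorted damage (fun x => x) false).length - 1) 0 = m := by
  set sd := PySem.List.sorted damage (fun x => x) false with hsd
  have hne : damage ≠ [] := by
    intro h; subst h; simp [PySem.List.max?] at hmax
  have hsne : sd ≠ [] := by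
    rw [hsd]
    intro h
    exact hne ((PySem.List.sorted_eq_nil_iff _ _ _).mp h)
  have hlen : 0 < sd.length := List.length_pos_iff.mpr hsne
  have hidx : sd.length - 1 < sd.length := by omega
  have hlast : sd.getD (sd.length - 1) 0 = sd[sd.length - 1] := List.getD_eq_getElem _ _ hidx
  -- sd[last] ∈ damage so sd[last] ≤ m
  have hmem : sd[sd.length - 1] ∈ damage := by
    have h' : sd[sd.length - 1] ∈ sd := List.getElem_mem _
    exact (PySem.List.mem_sorted damage (fun x => x) false _).mp h'
  have hle : sd[sd.length - 1] ≤ m := by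
    have := PySem.List.max?_isMax hmax sd[sd.length - 1] hmem
    simpa using this
  -- m ∈ sd so m = sd[i] for some i, and sd[i] ≤ sd[last]
  have hmmem : m ∈ sd :=
    (PySem.List.mem_sorted damage (fun x => x) false _).mpr (PySem.List.max?_mem hmax)
  obtain ⟨i, hi, hieq⟩ := List.getElem_of_mem hmmem
  have hge : m ≤ sd[sd.length - 1] := by
    rw [← hieq]
    exact PySem.List.sorted_id_getElem_mono damage (show i ≤ sd.length - 1 by omega) (show sd.length - 1 < sd.length by omega)
  omega

theorem minimumHealth_spec : Claim_equal_minimumHealth := by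
  intro damage armor _ hpre
  unfold Spec_minimumHealth minimumHealth minimumHealth_alt
  by_cases harm : armor = 0
  · simp [harm]
  · simp only [harm, if_neg, not_false_iff]
    have hne : damage ≠ [] := by
      rcases hpre with h | h
      · exact h
      · exact absurd h harm
    set sd := PySem.List.sorted damage (fun x => x) false with hsd
    have hsne : sd ≠ [] := by
      rw [hsd]; intro h
      exact hne ((PySem.List.sorted_eq_nil_iff _ _ _).mp h)
    have hlen : 0 < sd.length := List.length_pos_iff.mpr hsne
    obtain ⟨m, hmax⟩ : ∃ m, PySem.List.max? damage (fun x => x) = some m := by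
      cases hm : PySem.List.max? damage (fun x => x) with
      | none => exact absurd ((PySem.List.max?_eq_none_iff _ _).mp hm) hne
      | some m => exact ⟨m, rfl⟩
    have hlast : sd.getD (sd.length - 1) 0 = m := sorted_last_eq_max damage m hmax
    have hmono : ∀ p q : Nat, p ≤ q → q < sd.length → sd.getD p 0 ≤ sd.getD q 0 := by
      intro p q hpq hq
      rw [List.getD_eq_getElem _ _ (by omega), List.getD_eq_getElem _ _ hq]
      exact PySem.List.sorted_id_getElem_mono damage hpq hq
    rw [hmax]
    show _ = damage.sum - min m armor + 1
    by_cases hcase : sd.getD (sd.length - 1) 0 < armor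
    · -- all elements below armor: search ends at the last index, value = m, m < armor
      have hr : pvBSearch sd armor 0 (sd.length - 1) = sd.length - 1 :=
        pvBSearch_all_lt sd armor hmono (sd.length - 1) 0 (sd.length - 1)
          (by omega) (by omega) (by omega) hcase
      rw [hr, hlast]
      have hm : m < armor := by rw [hlast] at hcase; exact hcase
      rw [if_neg (show ¬ armor < m by omega), show min m armor = m by omega]
    · -- some element reaches armor: result value v ≥ armor, both give sum - armor + 1
      have hge : armor ≤ sd.getD (sd.length - 1) 0 := by omega
      obtain ⟨hv, _⟩ := pvBSearch_ex sd armor (sd.length - 1) 0 (sd.length - 1)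
        (by omega) (by omega) (by omega) hge
      have hma : armor ≤ m := by rw [hlast] at hge; exact hge
      have hmin : min m armor = armor := by omega
      rw [hmin]
      by_cases hlt : armor < sd.getD (pvBSearch sd armor 0 (sd.length - 1)) 0
      · rw [if_pos hlt]
      · rw [if_neg hlt, show sd.getD (pvBSearch sd armor 0 (sd.length - 1)) 0 = armor by omega]
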